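-- pv_equiv track=rewrite | github.com/trombasso/Obligs-UiT-21-22 | 2022V/Oblig 4/Eveluate Expression/EveluateExpression.py | insertBlanks
-- ===== SOURCE A (Python) =====
-- def insertBlanks(s):
--     result = ""
--
--     for ch in s:
--         if ch == "(" or ch == ")" or ch == "+" or ch == "-" or ch == "*" or ch == "/" or ch == "^" or ch == "%":
--             result += " " + ch + " "
--         else:
--             result += ch
--
--     return result
-- ===== SOURCE B (Python) =====
-- def insertBlanks(s):
--     for ch in "()+-*/^%":
--         s = s.replace(ch, " " + ch + " ")
--     return s
-- ===== Notes on version B (the rewrite author's own statement) =====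
-- stated objective: simpler
-- what changed: Replaced A's single per-character loop with an eight-branch if-chain and incremental string building by eight staged whole-string str.replace passes, one per operator character; correct because each replacement inserts only spaces and the operator itself, which no later pass touches.
import Mathlib
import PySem

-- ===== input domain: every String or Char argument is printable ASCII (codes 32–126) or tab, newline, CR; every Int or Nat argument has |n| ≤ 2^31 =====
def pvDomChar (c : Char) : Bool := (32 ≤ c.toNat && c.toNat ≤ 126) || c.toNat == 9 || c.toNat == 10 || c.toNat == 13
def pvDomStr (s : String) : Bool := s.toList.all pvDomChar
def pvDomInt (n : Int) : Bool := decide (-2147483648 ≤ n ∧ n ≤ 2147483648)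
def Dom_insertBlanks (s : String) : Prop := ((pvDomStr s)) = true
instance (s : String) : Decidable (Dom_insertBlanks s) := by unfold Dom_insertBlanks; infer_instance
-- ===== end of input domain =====

-- B replaces A's single accumulate-with-branches pass by eight staged whole-string replace passes, one per operator (objective: simpler).

-- ===== PORT A =====
def insertBlanks (s : String) : String :=
  String.ofList (s.toList.foldl (fun result ch =>
    if ch = '(' ∨ ch = ')' ∨ ch = '+' ∨ ch = '-' ∨ ch = '*' ∨ ch = '/' ∨ ch = '^' ∨ ch = '%'
    then result ++ [' ', ch, ' ']
    else result ++ [ch]) [])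

-- ===== PORT B =====
-- for ch in "()+-*/^%": s = s.replace(ch, " " + ch + " ")
def insertBlanks_alt (s : String) : String :=
  ("()+-*/^%".toList).foldl
    (fun acc ch => PySem.Str.replace acc (String.ofList [ch]) (String.ofList [' ', ch, ' '])) s

-- ===== PRECONDITION & SPEC =====
def Spec_insertBlanks (s : String) (out : String) : Prop := out = insertBlanks_alt s
instance (s : String) (out : String) : Decidable (Spec_insertBlanks s out) := by unfold Spec_insertBlanks; infer_instance

-- ===== CLAIM =====
def Claim_equal_insertBlanks : Prop := ∀ (s : String), Dom_insertBlanks s → Spec_insertBlanks s (insertBlanks s)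

-- ===== LEMMAS AND PROOFS =====

-- the per-set expansion: a char in `ops` becomes spaced, any other char stays
def pvExpand (ops : List Char) (c : Char) : List Char :=
  if c ∈ ops then [' ', c, ' '] else [c]

-- replace with a single-char pattern is a flatMap (unfolding of Chars.replace.go)
theorem pvGo_single (ch : Char) (new : List Char) :
    ∀ (l : List Char) (fuel : Nat) (acc : List Char), l.length ≤ fuel →
      PySem.Chars.replace.go [ch] new fuel l acc
        = acc.reverse ++ l.flatMap (fun c => if c = ch then new else [c]) := by
  intro l
  induction l with
  | nil =>
    intro fuel acc _
    cases fuel <;> simp [PySem.Chars.replace.go]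
  | cons c t ih =>
    intro fuel acc hf
    cases fuel with
    | zero => simp at hf
    | succ m =>
      by_cases h : c = ch
      · subst h
        have : [c].isPrefixOf (c :: t) = true := by simp [List.isPrefixOf]
        rw [PySem.Chars.replace.go]
        simp only [this, if_pos]
        rw [show List.drop [c].length (c :: t) = t from rfl]
        rw [ih _ _ (by simpa using Nat.le_of_succ_le_succ hf)]
        simp
      · have hpre : [ch].isPrefixOf (c :: t) = false := by
          simp [List.isPrefixOf, Ne.symm h]
        rw [PySem.Chars.replace.go]
        rw [if_neg (by simp [hpre])]
        rw [ih _ _ (by simpa using Nat.le_of_succ_le_succ hf)]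
        simp [h]

theorem pvReplace_single (l : List Char) (ch : Char) (new : List Char) :
    PySem.Chars.replace l [ch] new = l.flatMap (fun c => if c = ch then new else [c]) := by
  rw [PySem.Chars.replace, if_neg (by simp)]
  exact (pvGo_single ch new l l.length [] le_rfl).trans (by simp)

-- the staged replace passes over `ops` compose into one flatMap of pvExpand ops
theorem pvFold_replace (ops : List Char) (hnd : ops.Nodup) (hsp : ' ' ∉ ops) :
    ∀ (l : List Char),
      ops.foldl (fun acc ch => PySem.Chars.replace acc [ch] [' ', ch, ' ']) l
        = l.flatMap (pvExpand ops) := by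
  induction ops with
  | nil =>
    intro l
    have h : pvExpand [] = fun c => [c] := by funext c; simp [pvExpand]
    rw [h]
    simp
  | cons ch rest ih =>
    intro l
    have hch : ch ∉ rest := (List.nodup_cons.mp hnd).1
    have hsp' : ' ' ∉ rest := fun h => hsp (List.mem_cons_of_mem _ h)
    rw [List.foldl_cons, ih (List.nodup_cons.mp hnd).2 hsp', pvReplace_single,
      List.flatMap_assoc]
    congr 1
    funext c
    by_cases h : c = ch
    · subst h
      simp [pvExpand, hch, hsp']
    · simp [pvExpand, h]

-- ===== VERDICT =====
theorem insertBlanks_spec : Claim_equal_insertBlanks := by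
  intro s _
  unfold Spec_insertBlanks insertBlanks insertBlanks_alt
  -- A's loop as a flatMap of the same expansion
  have hA : (s.toList.foldl (fun result ch =>
      if ch = '(' ∨ ch = ')' ∨ ch = '+' ∨ ch = '-' ∨ ch = '*' ∨ ch = '/' ∨ ch = '^' ∨ ch = '%'
      then result ++ [' ', ch, ' ']
      else result ++ [ch]) [])
      = s.toList.flatMap (pvExpand "()+-*/^%".toList) := by
    have hbody : (fun (result : List Char) (ch : Char) =>
        if ch = '(' ∨ ch = ')' ∨ ch = '+' ∨ ch = '-' ∨ ch = '*' ∨ ch = '/' ∨ ch = '^' ∨ ch = '%'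
        then result ++ [' ', ch, ' ']
        else result ++ [ch])
        = (fun (result : List Char) (ch : Char) => result ++ pvExpand "()+-*/^%".toList ch) := by
      funext result ch
      have : (ch = '(' ∨ ch = ')' ∨ ch = '+' ∨ ch = '-' ∨ ch = '*' ∨ ch = '/' ∨ ch = '^' ∨ ch = '%')
          ↔ ch ∈ "()+-*/^%".toList := by simp
      simp only [pvExpand, this]
      split_ifs <;> rfl
    rw [hbody, PySem.List.foldl_append_eq_flatMap, List.nil_append]
  -- B's staged passes, moved to List Char
  have hB : ∀ (ops : List Char) (t : String),
      (ops.foldl (fun acc ch => PySem.Str.replace acc (String.ofList [ch]) (String.ofList [' ', ch, ' '])) t).toList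
        = ops.foldl (fun acc ch => PySem.Chars.replace acc [ch] [' ', ch, ' ']) t.toList := by
    intro ops
    induction ops with
    | nil => intro t; rfl
    | cons ch rest ih =>
      intro t
      rw [List.foldl_cons, List.foldl_cons, ih, PySem.Str.toList_replace,
        String.toList_ofList, String.toList_ofList]
  have hval : (("()+-*/^%".toList).foldl
      (fun acc ch => PySem.Str.replace acc (String.ofList [ch]) (String.ofList [' ', ch, ' '])) s).toList
      = s.toList.flatMap (pvExpand "()+-*/^%".toList) := by
    rw [hB, pvFold_replace _ (by decide) (by decide)]
  rw [hA, ← hval]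
  exact String.ofList_toList
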